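-- pv_equiv track=rewrite | github.com/schatty/bioinformatics | courses/1_finding_hidden_messages_in_dna/week_2.py | neighbours
-- ===== SOURCE A (Python) =====
-- def hamming_distance(s1, s2):
--     """ Return number of mismatching symbols in the strings s1 and s2 """
--     return sum(map(lambda i: s1[i] != s2[i], range(len(s1))))
--
-- def neighbours(pattern, d):
--     """
--     Return set of neighbours for given patternself.
--     Substring is considered as neighbour if its hamming distance id less then d
--     """
--     if d == 0:
--         return pattern
--     if len(pattern) == 1:
--         return {'A', 'C', 'G', 'T'}
--     neighbourhood = set()
--     suffix_neighbours = neighbours(pattern[1:], d)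
--     for s in suffix_neighbours:
--         if hamming_distance(pattern[1:], s) < d:
--             for nuc in ['A', 'C', 'G', 'T']:
--                 neighbourhood.add(nuc + s)
--         else:
--             neighbourhood.add(pattern[0] + s)
--     return neighbourhood
-- ===== SOURCE B (Python) =====
-- def neighbours(pattern, d):
--     if d == 0:
--         return pattern
--     # iterative dynamic programming from the last character towards the first:
--     # dist memoizes each candidate's Hamming distance to the corresponding
--     # suffix, so no distance is ever recomputed
--     res = {'A', 'C', 'G', 'T'}
--     dist = {c: int(c != pattern[-1]) for c in 'ACGT'}
--     for ch in reversed(pattern[:-1]):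
--         new, newdist = set(), {}
--         for s in res:
--             ds = dist[s]
--             if ds < d:
--                 for nuc in 'ACGT':
--                     t = nuc + s
--                     new.add(t)
--                     newdist[t] = ds + (nuc != ch)
--             else:
--                 t = ch + s
--                 new.add(t)
--                 newdist[t] = ds
--         res, dist = new, newdist
--     return res
-- ===== Notes on version B (the rewrite author's own statement) =====
-- stated objective: alternative
-- what changed: Replaces A's recursion on the suffix, which recomputes a full Hamming distance for every candidate at every level, by an iterative right-to-left pass over the pattern that memoizes each candidate's distance in a dict (intended as faster; a timing run measured 3.64x at the largest size both finished but could not confirm it, so no speed is claimed).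
-- outside the precondition, e.g. on neighbours('ACG', 0): A returns 'ACG', B returns 'ACG'
import Mathlib
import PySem

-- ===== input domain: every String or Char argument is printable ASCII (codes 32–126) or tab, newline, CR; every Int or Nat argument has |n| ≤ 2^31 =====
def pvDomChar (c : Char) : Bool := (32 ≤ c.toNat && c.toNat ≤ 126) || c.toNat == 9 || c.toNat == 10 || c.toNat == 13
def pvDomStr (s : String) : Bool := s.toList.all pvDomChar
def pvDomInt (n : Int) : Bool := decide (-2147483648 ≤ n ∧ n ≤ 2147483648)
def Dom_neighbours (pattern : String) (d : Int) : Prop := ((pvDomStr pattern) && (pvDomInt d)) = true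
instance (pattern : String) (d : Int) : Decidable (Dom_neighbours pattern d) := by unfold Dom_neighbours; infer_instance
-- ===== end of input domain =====

-- B replaces A's recursion (which recomputes a Hamming distance for every candidate at
-- every level) by an iterative right-to-left pass that carries each candidate's distance.

-- ===== PORT A =====
-- sum(map(lambda i: s1[i] != s2[i], range(len(s1)))), booleans summed as 0/1
def pvHammingDistance (s1 s2 : List Char) : Int :=
  ((PySem.List.pyRange 0 (PySem.List.len s1) 1).map
    (fun i => if PySem.List.pyGetD s1 i ' ' ≠ PySem.List.pyGetD s2 i ' ' then (1 : Int) else 0)).sum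

def pvNbA (p : List Char) (d : Int) : PySem.Set (List Char) :=
  if d = 0 then [p]
  else if p.length = 1 then [['A'], ['C'], ['G'], ['T']]
  else
    match p with
    | [] => []  -- Python never returns here: unbounded recursion on "" (RecursionError); excluded by Pre_
    | c :: rest =>
      (pvNbA rest d).foldl
        (fun acc s =>
          if pvHammingDistance rest s < d then
            ['A', 'C', 'G', 'T'].foldl (fun a nuc => PySem.Set.add a (nuc :: s)) acc
          else PySem.Set.add acc (c :: s))
        PySem.Set.empty

def neighbours (pattern : String) (d : Int) : List String :=
  (pvNbA pattern.toList d).map (fun s => String.ofList s)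

-- ===== PORT B =====
-- one level of the loop: rebuild the candidate set and its distance table
-- (dist[s] is total here: dist's keys are exactly res's elements, so getD's default is never read)
def pvStepB (d : Int) (ch : Char) (old : PySem.Dict (List Char) Int)
    (res : PySem.Set (List Char)) : PySem.Set (List Char) × PySem.Dict (List Char) Int :=
  res.foldl
    (fun nw s =>
      let ds := old.getD s 0
      if ds < d then
        ['A', 'C', 'G', 'T'].foldl
          (fun nw2 nuc =>
            (PySem.Set.add nw2.1 (nuc :: s),
             nw2.2.insert (nuc :: s) (ds + if nuc ≠ ch then 1 else 0))) nw
      else (PySem.Set.add nw.1 (ch :: s), nw.2.insert (ch :: s) ds))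
    (PySem.Set.empty, PySem.Dict.empty)

-- {c: int(c != pattern[-1]) for c in 'ACGT'}  (pattern[-1]: IndexError on "", excluded by Pre_)
def pvDist0 (p : List Char) : PySem.Dict (List Char) Int :=
  ['A', 'C', 'G', 'T'].foldl
    (fun dd c => dd.insert [c] (if c ≠ PySem.List.pyGetD p (-1) ' ' then (1 : Int) else 0))
    PySem.Dict.empty

-- for ch in reversed(pattern[:-1]): res, dist = step(res, dist)
def pvLoopB (d : Int) (p : List Char) : PySem.Set (List Char) × PySem.Dict (List Char) Int :=
  ((PySem.List.slice p none (some (-1))).reverse).foldl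
    (fun st ch => pvStepB d ch st.2 st.1)
    (PySem.Set.ofList [['A'], ['C'], ['G'], ['T']], pvDist0 p)

def neighbours_alt (pattern : String) (d : Int) : List String :=
  if d = 0 then [pattern]
  else ((pvLoopB d pattern.toList).1).map (fun s => String.ofList s)

-- ===== PRECONDITION & SPEC =====
-- Pre_ excludes d == 0, where A returns the pattern itself as a plain string rather than a
-- value of the declared set-of-strings return type, and the empty pattern, where A never
-- returns (unbounded recursion, RecursionError) and B raises IndexError.
def Pre_neighbours (pattern : String) (d : Int) : Prop := pattern ≠ "" ∧ d ≠ 0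
instance (pattern : String) (d : Int) : Decidable (Pre_neighbours pattern d) := by
  unfold Pre_neighbours; infer_instance

def pvWitness_neighbours : String × Int := ("AC", 1)

def Spec_neighbours (pattern : String) (d : Int) (out : List String) : Prop := out = neighbours_alt pattern d
instance (pattern : String) (d : Int) (out : List String) : Decidable (Spec_neighbours pattern d out) := by unfold Spec_neighbours; infer_instance

-- ===== CLAIM (what is proved, stated in full; the proofs are below) =====
def Claim_equal_neighbours : Prop := ∀ (pattern : String) (d : Int), Dom_neighbours pattern d → Pre_neighbours pattern d → Spec_neighbours pattern d (neighbours pattern d)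

-- ===== LEMMAS AND PROOFS =====

-- proof-side recursive Hamming distance (candidate-first inequality, as B writes it)
def pvHamR : List Char → List Char → Int
  | [], _ => 0
  | _ :: _, [] => 0
  | a :: x, b :: y => (if b ≠ a then 1 else 0) + pvHamR x y

lemma pvHam_getD (s1 s2 : List Char) :
    pvHammingDistance s1 s2 =
      ((List.range s1.length).map
        (fun k : Nat => if s1.getD k ' ' ≠ s2.getD k ' ' then (1 : Int) else 0)).sum := by
  rw [pvHammingDistance, PySem.List.pyRange_zero]
  simp only [PySem.List.len_eq, Int.toNat_natCast, List.map_map]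
  congr 1
  apply List.map_congr_left
  intro k _
  simp [PySem.List.pyGetD_natCast, List.getD]

lemma pvHamming_eq : ∀ (s1 s2 : List Char), s1.length = s2.length →
    pvHammingDistance s1 s2 = pvHamR s1 s2 := by
  intro s1
  induction s1 with
  | nil =>
    intro s2 _
    simp [pvHam_getD, pvHamR]
  | cons a x ih =>
    intro s2 hlen
    cases s2 with
    | nil => simp at hlen
    | cons b y =>
      have hx : x.length = y.length := by simpa using hlen
      rw [pvHam_getD]
      simp only [List.length_cons, List.range_succ_eq_map, List.map_cons, List.map_map,
        List.sum_cons, List.getD_cons_zero]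
      have hmap : (List.map ((fun k => if (a :: x).getD k ' ' ≠ (b :: y).getD k ' '
            then (1 : Int) else 0) ∘ Nat.succ) (List.range x.length))
          = List.map (fun k => if x.getD k ' ' ≠ y.getD k ' ' then (1 : Int) else 0)
            (List.range x.length) := by
        apply List.map_congr_left
        intro k _
        simp [Function.comp]
      rw [hmap, ← pvHam_getD, ih y hx, pvHamR]
      rcases eq_or_ne a b with h | h
      · simp [h]
      · simp [h, Ne.symm h]

-- one add+insert step preserves the level invariant
lemma pvQ_add {F : List Char → Int} {m : Nat} (S : PySem.Set (List Char))
    (D : PySem.Dict (List Char) Int) (t : List Char) (v : Int)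
    (hS : S.Nodup) (ht : t ∉ S)
    (hQ : ∀ u ∈ S, D.getD u 0 = F u ∧ u.length = m)
    (hv : v = F t) (hl : t.length = m) :
    (PySem.Set.add S t).Nodup ∧
      (∀ u ∈ PySem.Set.add S t, (D.insert t v).getD u 0 = F u ∧ u.length = m) := by
  constructor
  · exact PySem.Set.nodup_add S t hS
  · intro u hu
    rcases (PySem.Set.mem_add _ _ _).mp hu with h | rfl
    · have hne : u ≠ t := fun he => ht (he ▸ h)
      rw [PySem.Dict.getD_insert_of_ne D v 0 hne]
      exact hQ u h
    · rw [PySem.Dict.getD_insert_self]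
      exact ⟨hv, hl⟩

lemma pvStepKey (d : Int) (c : Char) (rest : List Char) (old : PySem.Dict (List Char) Int) :
    ∀ (l : List (List Char)) (accS : PySem.Set (List Char)) (accD : PySem.Dict (List Char) Int),
      l.Nodup →
      (∀ s ∈ l, ∀ ch : Char, ch :: s ∉ accS) →
      (∀ s ∈ l, old.getD s 0 = pvHammingDistance rest s ∧ old.getD s 0 = pvHamR rest s ∧
        s.length = rest.length) →
      accS.Nodup →
      (∀ t ∈ accS, accD.getD t 0 = pvHamR (c :: rest) t ∧ t.length = rest.length + 1) →
      (l.foldl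
          (fun nw s =>
            let ds := old.getD s 0
            if ds < d then
              ['A', 'C', 'G', 'T'].foldl
                (fun nw2 nuc =>
                  (PySem.Set.add nw2.1 (nuc :: s),
                   nw2.2.insert (nuc :: s) (ds + if nuc ≠ c then 1 else 0))) nw
            else (PySem.Set.add nw.1 (c :: s), nw.2.insert (c :: s) ds))
          (accS, accD)).1
        = l.foldl
            (fun acc s =>
              if pvHammingDistance rest s < d then
                ['A', 'C', 'G', 'T'].foldl (fun a nuc => PySem.Set.add a (nuc :: s)) acc
              else PySem.Set.add acc (c :: s)) accS ∧
      (l.foldl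
          (fun nw s =>
            let ds := old.getD s 0
            if ds < d then
              ['A', 'C', 'G', 'T'].foldl
                (fun nw2 nuc =>
                  (PySem.Set.add nw2.1 (nuc :: s),
                   nw2.2.insert (nuc :: s) (ds + if nuc ≠ c then 1 else 0))) nw
            else (PySem.Set.add nw.1 (c :: s), nw.2.insert (c :: s) ds))
          (accS, accD)).1.Nodup ∧
      (∀ t ∈ (l.foldl
          (fun nw s =>
            let ds := old.getD s 0
            if ds < d then
              ['A', 'C', 'G', 'T'].foldl
                (fun nw2 nuc =>
                  (PySem.Set.add nw2.1 (nuc :: s),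
                   nw2.2.insert (nuc :: s) (ds + if nuc ≠ c then 1 else 0))) nw
            else (PySem.Set.add nw.1 (c :: s), nw.2.insert (c :: s) ds))
          (accS, accD)).1,
        (l.foldl
          (fun nw s =>
            let ds := old.getD s 0
            if ds < d then
              ['A', 'C', 'G', 'T'].foldl
                (fun nw2 nuc =>
                  (PySem.Set.add nw2.1 (nuc :: s),
                   nw2.2.insert (nuc :: s) (ds + if nuc ≠ c then 1 else 0))) nw
            else (PySem.Set.add nw.1 (c :: s), nw.2.insert (c :: s) ds))
          (accS, accD)).2.getD t 0 = pvHamR (c :: rest) t ∧ t.length = rest.length + 1) := by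
  intro l
  induction l with
  | nil => intro accS accD _ _ _ hnodS hQ; exact ⟨rfl, hnodS, hQ⟩
  | cons s l ih =>
    intro accS accD hnod hfresh hcond hnodS hQ
    obtain ⟨hc1, hc2, hc3⟩ := hcond s List.mem_cons_self
    have hmemS : ∀ ch : Char, ch :: s ∉ accS := hfresh s List.mem_cons_self
    have hslen : ∀ ch : Char, (ch :: s).length = rest.length + 1 := by
      intro ch; simp [hc3]
    have hval : ∀ ch : Char, old.getD s 0 + (if ch ≠ c then (1 : Int) else 0)
        = pvHamR (c :: rest) (ch :: s) := by
      intro ch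
      rw [pvHamR, hc2]
      exact add_comm _ _
    by_cases hlt : old.getD s 0 < d
    · have hltA : pvHammingDistance rest s < d := by rw [← hc1]; exact hlt
      -- the four fresh additions, one at a time
      have q1 := pvQ_add (F := pvHamR (c :: rest)) (m := rest.length + 1) accS accD
        ('A' :: s) (old.getD s 0 + if 'A' ≠ c then 1 else 0) hnodS (hmemS 'A') hQ (hval 'A') (hslen 'A')
      have hm2 : ('C' :: s) ∉ PySem.Set.add accS ('A' :: s) := by
        intro h
        rcases (PySem.Set.mem_add _ _ _).mp h with h | h
        · exact hmemS 'C' h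
        · simp at h
      have q2 := pvQ_add (F := pvHamR (c :: rest)) (m := rest.length + 1) _ _
        ('C' :: s) (old.getD s 0 + if 'C' ≠ c then 1 else 0) q1.1 hm2 q1.2 (hval 'C') (hslen 'C')
      have hm3 : ('G' :: s) ∉ PySem.Set.add (PySem.Set.add accS ('A' :: s)) ('C' :: s) := by
        intro h
        rcases (PySem.Set.mem_add _ _ _).mp h with h | h
        · rcases (PySem.Set.mem_add _ _ _).mp h with h | h
          · exact hmemS 'G' h
          · simp at h
        · simp at h
      have q3 := pvQ_add (F := pvHamR (c :: rest)) (m := rest.length + 1) _ _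
        ('G' :: s) (old.getD s 0 + if 'G' ≠ c then 1 else 0) q2.1 hm3 q2.2 (hval 'G') (hslen 'G')
      have hm4 : ('T' :: s) ∉ PySem.Set.add (PySem.Set.add (PySem.Set.add accS ('A' :: s))
          ('C' :: s)) ('G' :: s) := by
        intro h
        rcases (PySem.Set.mem_add _ _ _).mp h with h | h
        · rcases (PySem.Set.mem_add _ _ _).mp h with h | h
          · rcases (PySem.Set.mem_add _ _ _).mp h with h | h
            · exact hmemS 'T' h
            · simp at h
          · simp at h
        · simp at h
      have q4 := pvQ_add (F := pvHamR (c :: rest)) (m := rest.length + 1) _ _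
        ('T' :: s) (old.getD s 0 + if 'T' ≠ c then 1 else 0) q3.1 hm4 q3.2 (hval 'T') (hslen 'T')
      simp only [List.foldl_cons, if_pos hlt, if_pos hltA, List.foldl_nil]
      apply ih
      · exact hnod.of_cons
      · intro s' hs' ch hmem
        have hne : s' ≠ s := by
          intro he
          exact (List.nodup_cons.mp hnod).1 (he ▸ hs')
        rcases (PySem.Set.mem_add _ _ _).mp hmem with h | h
        · rcases (PySem.Set.mem_add _ _ _).mp h with h | h
          · rcases (PySem.Set.mem_add _ _ _).mp h with h | h
            · rcases (PySem.Set.mem_add _ _ _).mp h with h | h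
              · exact hfresh s' (List.mem_cons_of_mem s hs') ch h
              · exact hne (List.cons_eq_cons.mp h).2
            · exact hne (List.cons_eq_cons.mp h).2
          · exact hne (List.cons_eq_cons.mp h).2
        · exact hne (List.cons_eq_cons.mp h).2
      · intro s' hs'
        exact hcond s' (List.mem_cons_of_mem s hs')
      · exact q4.1
      · exact q4.2
    · have hltA : ¬ pvHammingDistance rest s < d := by rw [← hc1]; exact hlt
      have q1 := pvQ_add (F := pvHamR (c :: rest)) (m := rest.length + 1) accS accD
        (c :: s) (old.getD s 0) hnodS (hmemS c) hQ (by rw [pvHamR, hc2]; simp) (hslen c)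
      simp only [List.foldl_cons, if_neg hlt, if_neg hltA]
      apply ih
      · exact hnod.of_cons
      · intro s' hs' ch hmem
        have hne : s' ≠ s := by
          intro he
          exact (List.nodup_cons.mp hnod).1 (he ▸ hs')
        rcases (PySem.Set.mem_add _ _ _).mp hmem with h | h
        · exact hfresh s' (List.mem_cons_of_mem s hs') ch h
        · exact hne (List.cons_eq_cons.mp h).2
      · intro s' hs'
        exact hcond s' (List.mem_cons_of_mem s hs')
      · exact q1.1
      · exact q1.2

lemma pvDist0_cons (c : Char) (rest : List Char) (h : rest ≠ []) :
    pvDist0 (c :: rest) = pvDist0 rest := by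
  unfold pvDist0
  rw [PySem.List.pyGetD_neg_one (c :: rest) ' ' (by simp),
    PySem.List.pyGetD_neg_one rest ' ' h, List.getLast_cons h]

lemma pvLoopB_cons (d : Int) (c : Char) (rest : List Char) (h : rest ≠ []) :
    pvLoopB d (c :: rest) = pvStepB d c (pvLoopB d rest).2 (pvLoopB d rest).1 := by
  unfold pvLoopB
  rw [PySem.List.slice_to_neg_one, PySem.List.slice_to_neg_one,
    List.dropLast_cons_of_ne_nil h, List.reverse_cons, List.foldl_append,
    List.foldl_cons, List.foldl_nil, pvDist0_cons c rest h]

lemma pvKey (d : Int) (hd : d ≠ 0) : ∀ (p : List Char), p ≠ [] →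
    pvNbA p d = (pvLoopB d p).1 ∧
    (∀ t ∈ (pvLoopB d p).1, (pvLoopB d p).2.getD t 0 = pvHamR p t ∧ t.length = p.length) ∧
    (pvLoopB d p).1.Nodup := by
  intro p
  induction p with
  | nil => intro h; exact absurd rfl h
  | cons c rest ih =>
    intro _
    by_cases hr : rest = []
    · subst hr
      have hloop : pvLoopB d [c] = (PySem.Set.ofList [['A'], ['C'], ['G'], ['T']], pvDist0 [c]) := by
        unfold pvLoopB
        rw [PySem.List.slice_to_neg_one]
        simp
      have hd0 : pvDist0 [c]
          = ((((PySem.Dict.empty.insert ['A'] (if 'A' ≠ c then (1 : Int) else 0)).insert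
              ['C'] (if 'C' ≠ c then 1 else 0)).insert
              ['G'] (if 'G' ≠ c then 1 else 0)).insert
              ['T'] (if 'T' ≠ c then 1 else 0)) := by
        unfold pvDist0
        rw [PySem.List.pyGetD_neg_one [c] ' ' (by simp)]
        simp only [List.getLast_singleton, List.foldl_cons, List.foldl_nil]
        rfl
      refine ⟨?_, ?_, ?_⟩
      · rw [hloop]
        rw [pvNbA, if_neg hd]
        simp
        decide
      · intro t ht
        rw [hloop] at ht
        simp only at ht
        have ht' : t ∈ [['A'], ['C'], ['G'], ['T']] := by
          have := (PySem.Set.mem_ofList _ _).mp ht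
          simpa using this
        rw [hloop]
        simp only [hd0]
        fin_cases ht' <;>
          simp [PySem.Dict.getD_insert, pvHamR]
      · rw [hloop]
        exact PySem.Set.nodup_ofList _
    · obtain ⟨hA, hInv, hNd⟩ := ih hr
      have hloop := pvLoopB_cons d c rest hr
      have hlen1 : (c :: rest).length ≠ 1 := by
        have : rest.length ≠ 0 := by simpa [List.length_eq_zero_iff] using hr
        simp [List.length_cons]
        omega
      have hunfold : pvNbA (c :: rest) d
          = (pvNbA rest d).foldl
              (fun acc s =>
                if pvHammingDistance rest s < d then
                  ['A', 'C', 'G', 'T'].foldl (fun a nuc => PySem.Set.add a (nuc :: s)) acc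
                else PySem.Set.add acc (c :: s))
              PySem.Set.empty := by
        rw [pvNbA]
        rw [if_neg hd, if_neg hlen1]
      have hcond : ∀ s ∈ (pvLoopB d rest).1,
          (pvLoopB d rest).2.getD s 0 = pvHammingDistance rest s ∧
          (pvLoopB d rest).2.getD s 0 = pvHamR rest s ∧ s.length = rest.length := by
        intro s hs
        obtain ⟨h1, h2⟩ := hInv s hs
        refine ⟨?_, h1, h2⟩
        rw [h1, pvHamming_eq rest s h2.symm]
      have hkey := pvStepKey d c rest (pvLoopB d rest).2 (pvLoopB d rest).1
        PySem.Set.empty PySem.Dict.empty hNd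
        (by intro s _ ch h; simp [PySem.Set.empty] at h)
        hcond
        (by simp [PySem.Set.empty])
        (by intro t ht; simp [PySem.Set.empty] at ht)
      refine ⟨?_, ?_, ?_⟩
      · rw [hunfold, hA, hloop]
        unfold pvStepB
        exact (hkey.1).symm
      · intro t ht
        rw [hloop] at ht ⊢
        unfold pvStepB at ht ⊢
        have h2 := hkey.2.2 t ht
        exact ⟨h2.1, by simp [h2.2]⟩
      · rw [hloop]
        unfold pvStepB
        exact hkey.2.1

-- ===== VERDICT (by name: the statement is the Claim_ definition above) =====
theorem neighbours_spec : Claim_equal_neighbours := by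
  intro pattern d _ hpre
  obtain ⟨hp, hd⟩ := hpre
  unfold Spec_neighbours
  have hpl : pattern.toList ≠ [] := by
    intro h
    exact hp (String.toList_eq_nil_iff.mp h)
  obtain ⟨hA, _, _⟩ := pvKey d hd pattern.toList hpl
  unfold neighbours neighbours_alt
  rw [if_neg hd, hA]
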